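-- pv_equiv track=rewrite | github.com/joerleigh/AdventOfCode2024 | 2024/day_5.py | order_is_invalid
-- ===== SOURCE A (Python) =====
-- def order_is_invalid(pages, rules):
--     broke_rule = False
--     for rule in rules:
--         try:
--             index1 = pages.index(rule[0])
--             index2 = pages.index(rule[1])
--         except ValueError:
--             continue
--         if index1 > index2:
--             broke_rule = True
--             break
--     return broke_rule
-- ===== SOURCE B (Python) =====
-- def order_is_invalid(pages, rules):
--     succ = {}
--     for r in rules:
--         succ.setdefault(r[0], []).append(r[1])
--     seen = set()
--     for p in pages:
--         if p in seen:
--             continue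
--         if any(q in seen for q in succ.get(p, ())):
--             return True
--         seen.add(p)
--     return False
-- ===== Notes on version B (the rewrite author's own statement) =====
-- stated objective: faster
-- what changed: Instead of scanning the pages list with .index for every rule, B builds a dict mapping each page to the pages its rules require after it, then makes one pass over pages with a seen set, flagging a violation when a first-seen page must precede some already-seen page.
import Mathlib
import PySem

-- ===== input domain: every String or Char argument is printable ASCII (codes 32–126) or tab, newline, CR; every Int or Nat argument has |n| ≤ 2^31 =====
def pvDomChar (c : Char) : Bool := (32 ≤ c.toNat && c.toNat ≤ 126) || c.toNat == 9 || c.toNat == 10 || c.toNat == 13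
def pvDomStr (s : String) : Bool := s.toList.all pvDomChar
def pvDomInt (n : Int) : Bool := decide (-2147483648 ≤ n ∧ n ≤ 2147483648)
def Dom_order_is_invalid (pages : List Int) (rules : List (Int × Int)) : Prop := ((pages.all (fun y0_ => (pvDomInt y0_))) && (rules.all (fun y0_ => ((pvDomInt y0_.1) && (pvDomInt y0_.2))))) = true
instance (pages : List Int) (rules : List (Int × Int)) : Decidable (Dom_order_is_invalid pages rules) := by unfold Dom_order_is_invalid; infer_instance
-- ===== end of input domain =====

-- B replaces A's per-rule .index scans by building a successor dict from the rules once and making one pass over pages with a seen-set (alternative decomposition; equivalence of return values proved below).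

-- ===== PORT A =====
-- 'for rule in rules' with break: structural recursion over rules; .index → PySem.List.index? (ValueError = none → continue)
def order_is_invalid_goA (pages : List Int) : List (Int × Int) → Bool
  | [] => false
  | r :: rs =>
    match PySem.List.index? pages r.1, PySem.List.index? pages r.2 with
    | some index1, some index2 =>
        if index1 > index2 then true else order_is_invalid_goA pages rs
    | _, _ => order_is_invalid_goA pages rs

def order_is_invalid (pages : List Int) (rules : List (Int × Int)) : Bool :=
  order_is_invalid_goA pages rules

-- ===== PORT B =====
-- 'succ.setdefault(r[0], []).append(r[1])': fold over rules building the successor dict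
def order_is_invalid_succ (rules : List (Int × Int)) : PySem.Dict Int (List Int) :=
  rules.foldl (fun succ r => succ.insert r.1 ((succ.getD r.1 []) ++ [r.2])) PySem.Dict.empty

-- 'for p in pages' with seen set and early return: structural recursion over pages
def order_is_invalid_goB (succ : PySem.Dict Int (List Int)) (seen : PySem.Set Int) : List Int → Bool
  | [] => false
  | p :: ps =>
    if PySem.Set.contains seen p then order_is_invalid_goB succ seen ps
    else if (succ.getD p []).any (fun q => PySem.Set.contains seen q) then true
    else order_is_invalid_goB succ (PySem.Set.add seen p) ps

def order_is_invalid_alt (pages : List Int) (rules : List (Int × Int)) : Bool :=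
  order_is_invalid_goB (order_is_invalid_succ rules) PySem.Set.empty pages

-- ===== PRECONDITION & SPEC =====
def Spec_order_is_invalid (pages : List Int) (rules : List (Int × Int)) (out : Bool) : Prop := out = order_is_invalid_alt pages rules
instance (pages : List Int) (rules : List (Int × Int)) (out : Bool) : Decidable (Spec_order_is_invalid pages rules out) := by unfold Spec_order_is_invalid; infer_instance

-- ===== CLAIM (what is proved, stated in full; the proofs are below) =====
def Claim_equal_order_is_invalid : Prop := ∀ (pages : List Int) (rules : List (Int × Int)), Dom_order_is_invalid pages rules → Spec_order_is_invalid pages rules (order_is_invalid pages rules)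

-- ===== LEMMAS AND PROOFS =====

-- common characterisation: some rule (a,b) whose b is seen strictly before the first occurrence of a
def Viol (pages : List Int) (rules : List (Int × Int)) : Prop :=
  ∃ k a b, pages[k]? = some a ∧ a ∉ pages.take k ∧ b ∈ pages.take k ∧ (a, b) ∈ rules

lemma index?_pair_iff (pages : List Int) (a b : Int) :
    (∃ i1 i2, PySem.List.index? pages a = some i1 ∧ PySem.List.index? pages b = some i2 ∧ i2 < i1)
    ↔ ∃ k, pages[k]? = some a ∧ a ∉ pages.take k ∧ b ∈ pages.take k := by
  constructor
  · rintro ⟨i1, i2, h1, h2, hlt⟩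
    obtain ⟨hk1, hv1, hmin1⟩ := PySem.List.getElem_of_index?_eq_some h1
    obtain ⟨hk2, hv2, _⟩ := PySem.List.getElem_of_index?_eq_some h2
    refine ⟨i1, ?_, ?_, ?_⟩
    · simp [List.getElem?_eq_getElem hk1, hv1]
    · intro hmem
      obtain ⟨j, hj, hje⟩ := List.getElem_of_mem hmem
      have hj' := hj
      simp only [List.length_take, lt_min_iff] at hj'
      rw [List.getElem_take] at hje
      exact hmin1 j hj'.1 (by simpa using hje)
    · have hlen : i2 < (pages.take i1).length := by
        simp [List.length_take]; omega
      have : (pages.take i1)[i2] = b := by rw [List.getElem_take]; exact hv2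
      exact this ▸ List.getElem_mem hlen
  · rintro ⟨k, hget, hnot, hb⟩
    have hk : k < pages.length := by
      by_contra h
      rw [List.getElem?_eq_none (by omega)] at hget
      simp at hget
    have hv : pages[k] = a := by
      rw [List.getElem?_eq_getElem hk] at hget
      exact Option.some.inj hget
    -- index? a = some k
    have h1 : PySem.List.index? pages a = some k := by
      rw [PySem.List.index?_eq_some_iff]
      refine ⟨pages.take k, pages.drop (k + 1), ?_, by simp [List.length_take]; omega, hnot⟩
      rw [← hv, List.getElem_cons_drop, List.take_append_drop]
    
    -- b ∈ pages, get its first index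
    have hbmem : b ∈ pages := List.mem_of_mem_take hb
    have h2s : (PySem.List.index? pages b).isSome := by
      rw [PySem.List.index?_isSome_iff]; exact hbmem
    obtain ⟨i2, h2⟩ := Option.isSome_iff_exists.mp h2s
    obtain ⟨hk2, hv2, hmin2⟩ := PySem.List.getElem_of_index?_eq_some h2
    refine ⟨k, i2, h1, h2, ?_⟩
    -- first index of b is < k since b occurs in take k
    by_contra hge
    obtain ⟨j, hj, hje⟩ := List.getElem_of_mem hb
    have hjk : j < k := by
      have := hj; simp [List.length_take] at this; omega
    have hjlen : j < pages.length := by omega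
    rw [List.getElem_take] at hje
    exact hmin2 j (by omega) (by simpa using hje)

lemma goA_iff (pages : List Int) (rules : List (Int × Int)) :
    order_is_invalid_goA pages rules = true ↔
      ∃ r ∈ rules, ∃ i1 i2, PySem.List.index? pages r.1 = some i1 ∧
        PySem.List.index? pages r.2 = some i2 ∧ i2 < i1 := by
  induction rules with
  | nil => simp [order_is_invalid_goA]
  | cons r rs ih =>
    rw [order_is_invalid_goA]
    cases h1 : PySem.List.index? pages r.1 with
    | none =>
      simp only [ih]
      constructor
      · rintro ⟨r', hr', w⟩; exact ⟨r', List.mem_cons_of_mem _ hr', w⟩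
      · rintro ⟨r', hr', i1, i2, e1, e2, hlt⟩
        rcases List.mem_cons.mp hr' with rfl | hmem
        · rw [h1] at e1; exact absurd e1 (by simp)
        · exact ⟨r', hmem, i1, i2, e1, e2, hlt⟩
    | some i1 =>
      cases h2 : PySem.List.index? pages r.2 with
      | none =>
        simp only [ih]
        constructor
        · rintro ⟨r', hr', w⟩; exact ⟨r', List.mem_cons_of_mem _ hr', w⟩
        · rintro ⟨r', hr', j1, j2, e1, e2, hlt⟩
          rcases List.mem_cons.mp hr' with rfl | hmem
          · rw [h2] at e2; exact absurd e2 (by simp)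
          · exact ⟨r', hmem, j1, j2, e1, e2, hlt⟩
      | some i2 =>
        by_cases hlt : i1 > i2
        · simp only [if_pos hlt, true_iff]
          exact ⟨r, List.mem_cons_self, i1, i2, h1, h2, hlt⟩
        · simp only [if_neg hlt, ih]
          constructor
          · rintro ⟨r', hr', w⟩; exact ⟨r', List.mem_cons_of_mem _ hr', w⟩
          · rintro ⟨r', hr', j1, j2, e1, e2, hl⟩
            rcases List.mem_cons.mp hr' with rfl | hmem
            · rw [h1] at e1; rw [h2] at e2
              injection e1 with e1; injection e2 with e2
              exact absurd hl (by omega)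
            · exact ⟨r', hmem, j1, j2, e1, e2, hl⟩

lemma mem_succ_iff (rules : List (Int × Int)) (a b : Int) :
    b ∈ (order_is_invalid_succ rules).getD a [] ↔ (a, b) ∈ rules := by
  have key : ∀ (rs : List (Int × Int)) (d : PySem.Dict Int (List Int)),
      b ∈ (rs.foldl (fun succ r => succ.insert r.1 ((succ.getD r.1 []) ++ [r.2])) d).getD a []
        ↔ b ∈ d.getD a [] ∨ (a, b) ∈ rs := by
    intro rs
    induction rs with
    | nil => simp
    | cons r rs ih =>
      intro d
      rw [List.foldl_cons, ih]
      by_cases ha : a = r.1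
      · subst ha
        simp only [PySem.Dict.getD_insert, if_true, List.mem_append,
          List.mem_cons, Prod.ext_iff]
        tauto
      · simp only [PySem.Dict.getD_insert, if_neg ha, List.mem_cons, Prod.ext_iff]
        tauto
  rw [order_is_invalid_succ, key]
  simp [PySem.Dict.getD_empty]

lemma goB_iff (succ : PySem.Dict Int (List Int)) :
    ∀ (rest : List Int) (seen : PySem.Set Int) (pre : List Int),
      (∀ x, x ∈ seen ↔ x ∈ pre) →
      (order_is_invalid_goB succ seen rest = true ↔
        ∃ k a b, rest[k]? = some a ∧ a ∉ pre ++ rest.take k ∧ b ∈ pre ++ rest.take k ∧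
          b ∈ succ.getD a []) := by
  intro rest
  induction rest with
  | nil =>
    intro seen pre _
    simp [order_is_invalid_goB]
  | cons p ps ih =>
    intro seen pre hinv
    rw [order_is_invalid_goB]
    by_cases hp : p ∈ seen
    · rw [if_pos (by rwa [PySem.Set.contains_iff])]
      have hppre : p ∈ pre := (hinv p).mp hp
      rw [ih seen (pre ++ [p]) (fun x => by
        rw [hinv x]; simp; intro hx; subst hx; exact hppre)]
      constructor
      · rintro ⟨k, a, b, hget, hnot, hb, hpair⟩
        refine ⟨k + 1, a, b, by simpa using hget, ?_, ?_, hpair⟩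
        · simpa [List.take_succ_cons, List.append_assoc] using hnot
        · simpa [List.take_succ_cons, List.append_assoc] using hb
      · rintro ⟨k, a, b, hget, hnot, hb, hpair⟩
        match k with
        | 0 =>
          simp at hget hnot
          exact absurd hppre (hget ▸ hnot)
        | k + 1 =>
          refine ⟨k, a, b, by simpa using hget, ?_, ?_, hpair⟩
          · simpa [List.take_succ_cons, List.append_assoc] using hnot
          · simpa [List.take_succ_cons, List.append_assoc] using hb
    · rw [if_neg (by rw [PySem.Set.contains_iff]; exact hp)]
      by_cases hany : (succ.getD p []).any (fun q => PySem.Set.contains seen q) = true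
      · rw [if_pos hany]
        obtain ⟨q, hq, hpq⟩ := List.any_eq_true.mp hany
        rw [PySem.Set.contains_iff] at hpq
        refine (iff_of_true rfl ?_)
        exact ⟨0, p, q, rfl, by simpa using fun h => hp ((hinv p).mpr h),
          by simpa using (hinv q).mp hpq, hq⟩
      · rw [if_neg hany]
        have hnone : ∀ q ∈ pre, q ∈ succ.getD p [] → False := by
          intro q hq hcon
          exact hany (List.any_eq_true.mpr ⟨q, hcon,
            by rw [PySem.Set.contains_iff]; exact (hinv q).mpr hq⟩)
        rw [ih (PySem.Set.add seen p) (pre ++ [p]) (fun x => by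
          rw [PySem.Set.mem_add, hinv x]; simp)]
        constructor
        · rintro ⟨k, a, b, hget, hnot, hb, hpair⟩
          refine ⟨k + 1, a, b, by simpa using hget, ?_, ?_, hpair⟩
          · simpa [List.take_succ_cons, List.append_assoc] using hnot
          · simpa [List.take_succ_cons, List.append_assoc] using hb
        · rintro ⟨k, a, b, hget, hnot, hb, hpair⟩
          match k with
          | 0 =>
            simp at hget hb hnot
            subst hget
            exact absurd hpair (fun h => hnone b hb h)
          | k + 1 =>
            refine ⟨k, a, b, by simpa using hget, ?_, ?_, hpair⟩
            · simpa [List.take_succ_cons, List.append_assoc] using hnot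
            · simpa [List.take_succ_cons, List.append_assoc] using hb

lemma A_iff_viol (pages : List Int) (rules : List (Int × Int)) :
    order_is_invalid pages rules = true ↔ Viol pages rules := by
  rw [order_is_invalid, goA_iff, Viol]
  constructor
  · rintro ⟨⟨a, b⟩, hr, w⟩
    obtain ⟨k, h1, h2, h3⟩ := (index?_pair_iff pages a b).mp w
    exact ⟨k, a, b, h1, h2, h3, hr⟩
  · rintro ⟨k, a, b, h1, h2, h3, hr⟩
    exact ⟨(a, b), hr, (index?_pair_iff pages a b).mpr ⟨k, h1, h2, h3⟩⟩

lemma B_iff_viol (pages : List Int) (rules : List (Int × Int)) :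
    order_is_invalid_alt pages rules = true ↔ Viol pages rules := by
  rw [order_is_invalid_alt,
    goB_iff (order_is_invalid_succ rules) pages PySem.Set.empty [] (fun x => by
      simp [PySem.Set.empty])]
  unfold Viol
  constructor
  · rintro ⟨k, a, b, h1, h2, h3, h4⟩
    exact ⟨k, a, b, h1, by simpa using h2, by simpa using h3, (mem_succ_iff rules a b).mp h4⟩
  · rintro ⟨k, a, b, h1, h2, h3, h4⟩
    exact ⟨k, a, b, h1, by simpa using h2, by simpa using h3, (mem_succ_iff rules a b).mpr h4⟩

-- ===== VERDICT (by name: the statement is the Claim_ definition above) =====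
theorem order_is_invalid_spec : Claim_equal_order_is_invalid := by
  intro pages rules _
  unfold Spec_order_is_invalid
  have := (A_iff_viol pages rules).trans (B_iff_viol pages rules).symm
  cases hA : order_is_invalid pages rules <;> cases hB : order_is_invalid_alt pages rules <;>
    simp_all
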